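-- pv_equiv track=rewrite | github.com/elpilasgsm/adventofcode | 2021/Day8/day8.py | lenToDigit
-- ===== SOURCE A (Python) =====
-- def lenToDigit(nOfSegm):
--     data = {}
--     for i in range(len(nOfSegm)):
--         curLn = nOfSegm[i]
--         if curLn not in data:
--             data[curLn] = []
--         data[curLn].append(i)
--     return data
-- ===== SOURCE B (Python) =====
-- def lenToDigit(nOfSegm):
--     keys = list(dict.fromkeys(nOfSegm))
--     return {v: [i for i, x in enumerate(nOfSegm) if x == v] for v in keys}
-- ===== Notes on version B (the rewrite author's own statement) =====
-- stated objective: alternative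
-- what changed: Replaces the single-pass dict-grouping loop by first computing the distinct values (first-occurrence order) and then rescanning the whole list once per distinct value with an enumerate comprehension.
import Mathlib
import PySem

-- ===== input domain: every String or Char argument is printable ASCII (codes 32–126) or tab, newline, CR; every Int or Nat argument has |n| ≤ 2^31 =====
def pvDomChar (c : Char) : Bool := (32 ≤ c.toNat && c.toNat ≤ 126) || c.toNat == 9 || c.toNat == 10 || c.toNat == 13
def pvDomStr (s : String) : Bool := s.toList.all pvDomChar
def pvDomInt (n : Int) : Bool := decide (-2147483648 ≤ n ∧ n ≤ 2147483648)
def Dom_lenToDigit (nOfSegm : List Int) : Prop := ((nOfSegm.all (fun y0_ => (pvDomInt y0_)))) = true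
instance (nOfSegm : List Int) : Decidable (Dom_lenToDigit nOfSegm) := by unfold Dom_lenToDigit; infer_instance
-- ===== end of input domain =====

-- B groups by first computing the distinct values and rescanning the list once per value,
-- instead of A's single grouping pass over a dict; alternative decomposition, not faster.

-- ===== PORT A =====
-- for i in range(len(nOfSegm)): curLn = nOfSegm[i]; if curLn not in data: data[curLn] = []; data[curLn].append(i)
def lenToDigit (nOfSegm : List Int) : List (Int × List Int) :=
  ((PySem.List.pyRange 0 (PySem.List.len nOfSegm) 1).foldl
    (fun data i =>
      let curLn := PySem.List.pyGetD nOfSegm i 0   -- index i is always in range here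
      let data := if data.contains curLn = false then data.insert curLn ([] : List Int) else data
      data.modify curLn [] (fun l => l ++ [i]))
    PySem.Dict.empty).items

-- ===== PORT B =====
-- keys = list(dict.fromkeys(nOfSegm)); {v: [i for i, x in enumerate(nOfSegm) if x == v] for v in keys}
def lenToDigit_alt (nOfSegm : List Int) : List (Int × List Int) :=
  (PySem.List.dedup nOfSegm).map (fun v =>
    (v, ((PySem.List.enumerate nOfSegm 0).filter (fun p => p.2 == v)).map (·.1)))

-- ===== PRECONDITION & SPEC =====
def Spec_lenToDigit (nOfSegm : List Int) (out : List (Int × List Int)) : Prop := out = lenToDigit_alt nOfSegm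
instance (nOfSegm : List Int) (out : List (Int × List Int)) : Decidable (Spec_lenToDigit nOfSegm out) := by unfold Spec_lenToDigit; infer_instance

-- ===== CLAIM (what is proved, stated in full; the proofs are below) =====
def Claim_equal_lenToDigit : Prop := ∀ (nOfSegm : List Int), Dom_lenToDigit nOfSegm → Spec_lenToDigit nOfSegm (lenToDigit nOfSegm)

-- ===== LEMMAS AND PROOFS =====

-- A's per-step "ensure key, then append" equals a plain modify-append step.
theorem step_eq_modify (d : PySem.Dict Int (List Int)) (x i : Int) :
    ((if d.contains x = false then d.insert x ([] : List Int) else d).modify x [] (fun l => l ++ [i]))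
      = d.modify x [] (fun l => l ++ [i]) := by
  by_cases h : d.contains x = false
  · rw [if_pos h]
    simp only [PySem.Dict.modify, PySem.Dict.getD_insert_self, PySem.Dict.insert_insert_self,
      PySem.Dict.getD_of_not_contains d [] h]
  · simp [h]

-- A's dict is the modify-append fold over the swapped enumeration (value, index).
theorem lenToDigit_eq_fold (nOfSegm : List Int) :
    lenToDigit nOfSegm =
      (((PySem.List.enumerate nOfSegm 0).map (fun p => (p.2, p.1))).foldl
        (fun d p => d.modify p.1 [] (fun l => l ++ [p.2])) PySem.Dict.empty).items := by
  unfold lenToDigit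
  rw [PySem.List.enumerate_eq_map_pyRange nOfSegm 0, List.map_map, List.foldl_map]
  congr 1
  apply PySem.List.foldl_congr_mem
  intro d i _
  exact step_eq_modify d (PySem.List.pyGetD nOfSegm i 0) i

theorem lenToDigit_spec_aux (nOfSegm : List Int) :
    lenToDigit nOfSegm = lenToDigit_alt nOfSegm := by
  rw [lenToDigit_eq_fold]
  set g := (PySem.List.enumerate nOfSegm 0).map (fun p => (p.2, p.1)) with hg
  have hnodup : ((g.foldl (fun d p => d.modify p.1 [] (fun l => l ++ [p.2]))
      PySem.Dict.empty)).keys.Nodup := by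
    exact PySem.Dict.nodup_keys_foldl_modify_key g (·.1) [] (fun d p => fun l => l ++ [p.2]) _
      PySem.Dict.nodup_keys_empty
  rw [PySem.Dict.items_eq_map_keys _ hnodup []]
  have hkeys : (g.foldl (fun d p => d.modify p.1 [] (fun l => l ++ [p.2]))
      PySem.Dict.empty).keys = PySem.List.dedup nOfSegm := by
    rw [PySem.Dict.keys_foldl_modify_key]
    simp [hg, List.map_map, Function.comp_def, PySem.List.map_snd_enumerate, PySem.Set.update,
      PySem.Dict.keys_empty, PySem.List.dedup_eq_ofList, PySem.Set.ofList_eq_foldl]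
  rw [hkeys]
  unfold lenToDigit_alt
  apply List.map_congr_left
  intro v _
  rw [PySem.Dict.getD_foldl_modify_append]
  simp [hg, PySem.Dict.getD_empty, List.filter_map, List.map_map, Function.comp_def]

-- ===== VERDICT (by name: the statement is the Claim_ definition above) =====
theorem lenToDigit_spec : Claim_equal_lenToDigit := by
  intro nOfSegm _
  unfold Spec_lenToDigit
  exact lenToDigit_spec_aux nOfSegm
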